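-- pv_equiv track=rewrite | github.com/ivi982010/SySdL-TPs | Lexer.py | a_OpRel1
-- ===== SOURCE A (Python) =====
-- def a_OpRel1(tokens, acu):
-- 	s=0;
-- 	for c in acu:
-- 		if s==0 and c==':':
-- 			s=1
-- 		elif s==1 and c=='=':
-- 			s=2
-- 		else:
-- 			s=-1
-- 			break
-- 	if s==2:
-- 		tokens.append(("<OpMat>",acu))
-- 	return s==2
-- ===== SOURCE B (Python) =====
-- def a_OpRel1(tokens, acu):
--     if acu == ':=':
--         tokens.append(("<OpMat>", acu))
--         return True
--     return False
-- ===== Notes on version B (the rewrite author's own statement) =====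
-- stated objective: simpler
-- what changed: Replaces the character-by-character state machine (state integer with early break) by one direct string equality test acu == ':=', appending the token only on a match.
import Mathlib
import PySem

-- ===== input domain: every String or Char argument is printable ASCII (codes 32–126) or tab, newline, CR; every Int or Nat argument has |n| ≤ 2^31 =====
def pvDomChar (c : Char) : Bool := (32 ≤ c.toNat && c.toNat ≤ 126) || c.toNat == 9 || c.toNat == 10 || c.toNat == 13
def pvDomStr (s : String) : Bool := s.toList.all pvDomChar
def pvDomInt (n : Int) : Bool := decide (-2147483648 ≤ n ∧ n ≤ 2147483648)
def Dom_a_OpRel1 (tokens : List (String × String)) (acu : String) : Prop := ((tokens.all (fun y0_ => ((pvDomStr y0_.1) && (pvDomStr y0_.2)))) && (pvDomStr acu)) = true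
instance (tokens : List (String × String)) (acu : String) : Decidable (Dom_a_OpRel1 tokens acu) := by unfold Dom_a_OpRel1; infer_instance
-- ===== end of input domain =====

-- B replaces A's integer state machine over the characters of acu by the single
-- string comparison acu == ":=" (return value only: both versions also append the
-- same token to tokens exactly when they return True).

-- ===== PORT A =====
-- A's for-loop with early break: state s, processed character by character.
def a_OpRel1_loop (s : Int) (cs : List Char) : Int :=
  match cs with
  | [] => s
  | c :: rest =>
    if s == 0 && c == ':' then a_OpRel1_loop 1 rest
    else if s == 1 && c == '=' then a_OpRel1_loop 2 rest
    else -1  -- s=-1; break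

def a_OpRel1 (tokens : List (String × String)) (acu : String) : Bool :=
  let s := a_OpRel1_loop 0 acu.toList
  -- if s==2: tokens.append(...)  (mutation; return value is s==2)
  s == 2

-- ===== PORT B =====
def a_OpRel1_alt (tokens : List (String × String)) (acu : String) : Bool :=
  acu == ":="

-- ===== PRECONDITION & SPEC =====
def Spec_a_OpRel1 (tokens : List (String × String)) (acu : String) (out : Bool) : Prop := out = a_OpRel1_alt tokens acu
instance (tokens : List (String × String)) (acu : String) (out : Bool) : Decidable (Spec_a_OpRel1 tokens acu out) := by unfold Spec_a_OpRel1; infer_instance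

-- ===== CLAIM (what is proved, stated in full; the proofs are below) =====
def Claim_equal_a_OpRel1 : Prop := ∀ (tokens : List (String × String)) (acu : String), Dom_a_OpRel1 tokens acu → Spec_a_OpRel1 tokens acu (a_OpRel1 tokens acu)

-- ===== LEMMAS AND PROOFS =====

-- A's state machine accepts exactly the two-character list [':', '='].
theorem a_OpRel1_loop_eq_two (cs : List Char) :
    (a_OpRel1_loop 0 cs == 2) = (cs = [':', '='] : Bool) := by
  match cs with
  | [] => simp [a_OpRel1_loop]
  | c :: rest =>
    by_cases hc : c = ':'
    · subst hc
      match rest with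
      | [] => simp [a_OpRel1_loop]
      | d :: rest2 =>
        by_cases hd : d = '='
        · subst hd
          match rest2 with
          | [] => simp [a_OpRel1_loop]
          | e :: rest3 => simp [a_OpRel1_loop]
        · simp [a_OpRel1_loop, hd]
    · simp [a_OpRel1_loop, hc]

theorem string_eq_colon_eq (acu : String) :
    (acu == ":=") = (acu.toList = [':', '='] : Bool) := by
  have h : (acu = ":=") ↔ (acu.toList = [':', '=']) := by
    constructor
    · intro h; subst h; decide
    · intro h
      have h2 := congrArg String.ofList h
      simpa using h2
  rw [Bool.eq_iff_iff]
  simp [h]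

-- ===== VERDICT (by name: the statement is the Claim_ definition above) =====
theorem a_OpRel1_spec : Claim_equal_a_OpRel1 := by
  intro tokens acu _
  unfold Spec_a_OpRel1 a_OpRel1 a_OpRel1_alt
  rw [string_eq_colon_eq, a_OpRel1_loop_eq_two]
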